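/- GENERATED by farm/mkstatement.py from design/units.tsv (unit `GifFreeSavedImages.1`) and the assertions of Gif/Spec/Seg_GifFreeSavedImages.lean — do not edit.
   THE STATEMENT of the proof unit `GifFreeSavedImages.1`: segment 1 of `GifFreeSavedImages` (12 instructions; entries 0x107ee0;
   exits 0x107f18; ranges 0x107ee0-0x107f07)
   takes each of its entry assertions to one of its exit assertions (`Gif.Spec.GifFreeSavedImages.Seg1`), given the contracts of its callees.
   What the names mean: ProgX/Base/Spec/Basic.lean (the shared hypotheses), Gif/Spec/Seg_GifFreeSavedImages.lean (the assertions). The theorem to prove: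
   `theorem GifFreeSavedImages_1_ok : Gif.Spec.GifFreeSavedImages_1.Statement`. -/
import Gif.Code
import Gif.Dec.All
import Gif.Labels
import Gif.Spec.Seg_GifFreeSavedImages
namespace Gif.Spec.GifFreeSavedImages_1
open X86 X86.User Asan

/-- The statement of unit `GifFreeSavedImages.1`. -/
def Statement : Prop :=
  ∀ (Lay : Layout) (_hLay : Lay.hi = 0x1000000) (μ : Microarch) (_hμ : UserX.MicroOK μ) (u₀ : State)
    (_hcode : HasCodeNat Lay u₀ Gif.L.GifFreeSavedImages.entry Gif.Code.code_GifFreeSavedImages.nat Gif.L.GifFreeSavedImages.size)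
    (_h_asan_load8_noabort : Asan.SmallCheck Lay μ ProgX.Base.WayInv (ProgX.Base.CodeOK u₀) [.rax, .rcx, .rdx] 8 ProgX.Base.L.__asan_load8_noabort.entry),
    Gif.Spec.GifFreeSavedImages.Seg1 Lay μ u₀

end Gif.Spec.GifFreeSavedImages_1
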